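-- pv_equiv track=rewrite | github.com/VuBui217/dailycodingchallenge | 2026/march/anniversary_milestones.py | get_milestone
-- ===== SOURCE A (Python) =====
-- def get_milestone(years):
--     years_milestone = [(0, "Newlyweds"), (1, "Paper"), (5, "Wood"), (10, "Tin"),
--               (25, "Silver"), (40, "Ruby"), (50, "Gold"), (60, "Diamond"), (70, "Platinum")]
--
--     if years < 0:
--         return 'Invalid year'
--     recent_milestone = None
--     for year, milestone in years_milestone:
--         if years >= year:
--             recent_milestone = milestone
--         else:
--             break
--     return recent_milestone
-- ===== SOURCE B (Python) =====
-- def get_milestone(years):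
--     if years < 0:
--         return 'Invalid year'
--     thresholds = [0, 1, 5, 10, 25, 40, 50, 60, 70]
--     names = ["Newlyweds", "Paper", "Wood", "Tin",
--              "Silver", "Ruby", "Gold", "Diamond", "Platinum"]
--     lo, hi = 0, len(thresholds)
--     while lo < hi:  # hand-rolled bisect_right
--         mid = (lo + hi) // 2
--         if thresholds[mid] <= years:
--             lo = mid + 1
--         else:
--             hi = mid
--     return names[lo - 1]
-- ===== Notes on version B (the rewrite author's own statement) =====
-- stated objective: alternative
-- what changed: Replaced the linear scan-with-break over (threshold,name) pairs by a hand-rolled bisect_right binary search over a sorted threshold list with parallel names.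
import Mathlib
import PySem

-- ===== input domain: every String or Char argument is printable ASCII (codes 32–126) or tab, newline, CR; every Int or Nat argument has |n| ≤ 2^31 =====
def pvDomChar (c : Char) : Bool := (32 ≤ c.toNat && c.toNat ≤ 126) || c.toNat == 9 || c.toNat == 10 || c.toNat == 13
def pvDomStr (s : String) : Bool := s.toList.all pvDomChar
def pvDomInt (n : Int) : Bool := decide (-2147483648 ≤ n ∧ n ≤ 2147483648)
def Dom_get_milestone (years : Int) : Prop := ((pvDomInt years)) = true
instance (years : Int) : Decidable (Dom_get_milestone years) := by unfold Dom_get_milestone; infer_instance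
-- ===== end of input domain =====

-- B replaces A's linear scan-with-break by a binary search (bisect_right) over sorted thresholds.

-- ===== PORT A =====
-- A's for-loop with break over the (year, milestone) table, carrying recent_milestone.
def pvALoop (years : Int) : List (Int × String) → Option String → Option String
  | [], acc => acc
  | (y, m) :: rest, acc => if years ≥ y then pvALoop years rest (some m) else acc

def get_milestone (years : Int) : String :=
  let table : List (Int × String) :=
    [(0, "Newlyweds"), (1, "Paper"), (5, "Wood"), (10, "Tin"),
     (25, "Silver"), (40, "Ruby"), (50, "Gold"), (60, "Diamond"), (70, "Platinum")]
  if years < 0 then "Invalid year"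
  else
    -- recent_milestone is never None when years ≥ 0 (the first threshold is 0); "None" is the unreachable default
    (pvALoop years table none).getD "None"

-- ===== PORT B =====
-- hand-rolled bisect_right loop from Source B
-- the while loop of Source B; fuel (= hi - lo at the call site) only guards totality, it is never exhausted
def pvBisect (thresholds : List Int) (years : Int) : Nat → Nat → Nat → Nat
  | 0, lo, _ => lo
  | fuel + 1, lo, hi =>
    if lo < hi then
      let mid := (lo + hi) / 2
      if thresholds.getD mid 0 ≤ years then pvBisect thresholds years fuel (mid + 1) hi
      else pvBisect thresholds years fuel lo mid
    else lo

def get_milestone_alt (years : Int) : String :=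
  if years < 0 then "Invalid year"
  else
    let thresholds : List Int := [0, 1, 5, 10, 25, 40, 50, 60, 70]
    let names : List String :=
      ["Newlyweds", "Paper", "Wood", "Tin", "Silver", "Ruby", "Gold", "Diamond", "Platinum"]
    let lo := pvBisect thresholds years thresholds.length 0 thresholds.length
    names.getD (lo - 1) "None"

-- ===== PRECONDITION & SPEC =====
def Spec_get_milestone (years : Int) (out : String) : Prop := out = get_milestone_alt years
instance (years : Int) (out : String) : Decidable (Spec_get_milestone years out) := by unfold Spec_get_milestone; infer_instance

-- ===== CLAIM (what is proved, stated in full; the proofs are below) =====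
def Claim_equal_get_milestone : Prop := ∀ (years : Int), Dom_get_milestone years → Spec_get_milestone years (get_milestone years)

-- ===== LEMMAS AND PROOFS =====

-- ===== VERDICT (by name: the statement is the Claim_ definition above) =====
theorem get_milestone_spec : Claim_equal_get_milestone := by
  intro years _
  unfold Spec_get_milestone get_milestone get_milestone_alt
  by_cases h0 : years < 0
  · simp [h0]
  · have hcase : (0 ≤ years ∧ years < 1) ∨ (1 ≤ years ∧ years < 5) ∨ (5 ≤ years ∧ years < 10) ∨ (10 ≤ years ∧ years < 25) ∨ (25 ≤ years ∧ years < 40) ∨ (40 ≤ years ∧ years < 50) ∨ (50 ≤ years ∧ years < 60) ∨ (60 ≤ years ∧ years < 70) ∨ (70 ≤ years) := by omega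
    rcases hcase with ⟨l0, u0⟩|⟨l1, u1⟩|⟨l2, u2⟩|⟨l3, u3⟩|⟨l4, u4⟩|⟨l5, u5⟩|⟨l6, u6⟩|⟨l7, u7⟩|l8
    · have c0 : (0:Int) ≤ years := by omega
      have n1 : ¬ (1:Int) ≤ years := by omega
      have n2 : ¬ (5:Int) ≤ years := by omega
      have n3 : ¬ (10:Int) ≤ years := by omega
      have n4 : ¬ (25:Int) ≤ years := by omega
      have n5 : ¬ (40:Int) ≤ years := by omega
      have n6 : ¬ (50:Int) ≤ years := by omega
      have n7 : ¬ (60:Int) ≤ years := by omega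
      have n8 : ¬ (70:Int) ≤ years := by omega
      simp [pvALoop, pvBisect, h0, c0, n1, n2, n3, n4, n5, n6, n7, n8]
    · have c0 : (0:Int) ≤ years := by omega
      have c1 : (1:Int) ≤ years := by omega
      have n2 : ¬ (5:Int) ≤ years := by omega
      have n3 : ¬ (10:Int) ≤ years := by omega
      have n4 : ¬ (25:Int) ≤ years := by omega
      have n5 : ¬ (40:Int) ≤ years := by omega
      have n6 : ¬ (50:Int) ≤ years := by omega
      have n7 : ¬ (60:Int) ≤ years := by omega
      have n8 : ¬ (70:Int) ≤ years := by omega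
      simp [pvALoop, pvBisect, h0, c0, c1, n2, n3, n4, n5, n6, n7, n8]
    · have c0 : (0:Int) ≤ years := by omega
      have c1 : (1:Int) ≤ years := by omega
      have c2 : (5:Int) ≤ years := by omega
      have n3 : ¬ (10:Int) ≤ years := by omega
      have n4 : ¬ (25:Int) ≤ years := by omega
      have n5 : ¬ (40:Int) ≤ years := by omega
      have n6 : ¬ (50:Int) ≤ years := by omega
      have n7 : ¬ (60:Int) ≤ years := by omega
      have n8 : ¬ (70:Int) ≤ years := by omega
      simp [pvALoop, pvBisect, h0, c0, c1, c2, n3, n4, n5, n6, n7, n8]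
    · have c0 : (0:Int) ≤ years := by omega
      have c1 : (1:Int) ≤ years := by omega
      have c2 : (5:Int) ≤ years := by omega
      have c3 : (10:Int) ≤ years := by omega
      have n4 : ¬ (25:Int) ≤ years := by omega
      have n5 : ¬ (40:Int) ≤ years := by omega
      have n6 : ¬ (50:Int) ≤ years := by omega
      have n7 : ¬ (60:Int) ≤ years := by omega
      have n8 : ¬ (70:Int) ≤ years := by omega
      simp [pvALoop, pvBisect, h0, c0, c1, c2, c3, n4, n5, n6, n7, n8]
    · have c0 : (0:Int) ≤ years := by omega
      have c1 : (1:Int) ≤ years := by omega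
      have c2 : (5:Int) ≤ years := by omega
      have c3 : (10:Int) ≤ years := by omega
      have c4 : (25:Int) ≤ years := by omega
      have n5 : ¬ (40:Int) ≤ years := by omega
      have n6 : ¬ (50:Int) ≤ years := by omega
      have n7 : ¬ (60:Int) ≤ years := by omega
      have n8 : ¬ (70:Int) ≤ years := by omega
      simp [pvALoop, pvBisect, h0, c0, c1, c2, c3, c4, n5, n6, n7, n8]
    · have c0 : (0:Int) ≤ years := by omega
      have c1 : (1:Int) ≤ years := by omega
      have c2 : (5:Int) ≤ years := by omega
      have c3 : (10:Int) ≤ years := by omega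
      have c4 : (25:Int) ≤ years := by omega
      have c5 : (40:Int) ≤ years := by omega
      have n6 : ¬ (50:Int) ≤ years := by omega
      have n7 : ¬ (60:Int) ≤ years := by omega
      have n8 : ¬ (70:Int) ≤ years := by omega
      simp [pvALoop, pvBisect, h0, c0, c1, c2, c3, c4, c5, n6, n7, n8]
    · have c0 : (0:Int) ≤ years := by omega
      have c1 : (1:Int) ≤ years := by omega
      have c2 : (5:Int) ≤ years := by omega
      have c3 : (10:Int) ≤ years := by omega
      have c4 : (25:Int) ≤ years := by omega
      have c5 : (40:Int) ≤ years := by omega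
      have c6 : (50:Int) ≤ years := by omega
      have n7 : ¬ (60:Int) ≤ years := by omega
      have n8 : ¬ (70:Int) ≤ years := by omega
      simp [pvALoop, pvBisect, h0, c0, c1, c2, c3, c4, c5, c6, n7, n8]
    · have c0 : (0:Int) ≤ years := by omega
      have c1 : (1:Int) ≤ years := by omega
      have c2 : (5:Int) ≤ years := by omega
      have c3 : (10:Int) ≤ years := by omega
      have c4 : (25:Int) ≤ years := by omega
      have c5 : (40:Int) ≤ years := by omega
      have c6 : (50:Int) ≤ years := by omega
      have c7 : (60:Int) ≤ years := by omega
      have n8 : ¬ (70:Int) ≤ years := by omega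
      simp [pvALoop, pvBisect, h0, c0, c1, c2, c3, c4, c5, c6, c7, n8]
    · have c0 : (0:Int) ≤ years := by omega
      have c1 : (1:Int) ≤ years := by omega
      have c2 : (5:Int) ≤ years := by omega
      have c3 : (10:Int) ≤ years := by omega
      have c4 : (25:Int) ≤ years := by omega
      have c5 : (40:Int) ≤ years := by omega
      have c6 : (50:Int) ≤ years := by omega
      have c7 : (60:Int) ≤ years := by omega
      have c8 : (70:Int) ≤ years := by omega
      simp [pvALoop, pvBisect, h0, c0, c1, c2, c3, c4, c5, c6, c7, c8]
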